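-- pv_equiv track=rewrite | github.com/OnurEmiroglu/THESIS | src/wp2/synth_regime.py | apply_dwell_filter
-- ===== SOURCE A (Python) =====
-- def apply_dwell_filter(
--     regime_labels: list[str],
--     min_dwell: int = 5,
-- ) -> list[str]:
--     """Replace regime runs shorter than *min_dwell* with the previous regime.
--
--     "warmup" labels pass through unchanged and are not counted as regime runs.
--     """
--     out = list(regime_labels)
--     n = len(out)
--
--     # Identify contiguous runs of non-warmup labels
--     i = 0
--     while i < n:
--         if out[i] == "warmup":
--             i += 1
--             continue
--         # start of a run
--         j = i + 1
--         while j < n and out[j] == out[i]: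
--             j += 1
--         run_len = j - i
--         if run_len < min_dwell:
--             # find the previous non-warmup label (fall back to current if none)
--             prev = out[i]
--             for k in range(i - 1, -1, -1):
--                 if out[k] != "warmup":
--                     prev = out[k]
--                     break
--             for k in range(i, j):
--                 out[k] = prev
--         i = j
--     return out
-- ===== SOURCE B (Python) =====
-- def apply_dwell_filter(
--     regime_labels: list[str],
--     min_dwell: int = 5,
-- ) -> list[str]:
--     """Replace regime runs shorter than *min_dwell* with the previous regime.
--
--     Compress into (label, count) runs, then emit each run while tracking the
--     last finalized non-warmup label, instead of rescanning backwards at each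
--     short run.
--     """
--     runs = []
--     for lab in regime_labels:
--         if runs and runs[-1][0] == lab and lab != "warmup":
--             runs[-1][1] += 1
--         else:
--             runs.append([lab, 1])
--     out = []
--     last = None
--     for lab, cnt in runs:
--         if lab == "warmup":
--             out.extend(["warmup"] * cnt)
--         else:
--             emit = lab if (cnt >= min_dwell or last is None) else last
--             out.extend([emit] * cnt)
--             last = emit
--     return out
-- ===== Notes on version B (the rewrite author's own statement) =====
-- stated objective: alternative
-- what changed: B replaces A's in-place rewrite with a backward rescan for the previous non-warmup label at each short run by a run-compression pass plus one forward pass that carries the last finalized non-warmup label.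
import Mathlib
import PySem

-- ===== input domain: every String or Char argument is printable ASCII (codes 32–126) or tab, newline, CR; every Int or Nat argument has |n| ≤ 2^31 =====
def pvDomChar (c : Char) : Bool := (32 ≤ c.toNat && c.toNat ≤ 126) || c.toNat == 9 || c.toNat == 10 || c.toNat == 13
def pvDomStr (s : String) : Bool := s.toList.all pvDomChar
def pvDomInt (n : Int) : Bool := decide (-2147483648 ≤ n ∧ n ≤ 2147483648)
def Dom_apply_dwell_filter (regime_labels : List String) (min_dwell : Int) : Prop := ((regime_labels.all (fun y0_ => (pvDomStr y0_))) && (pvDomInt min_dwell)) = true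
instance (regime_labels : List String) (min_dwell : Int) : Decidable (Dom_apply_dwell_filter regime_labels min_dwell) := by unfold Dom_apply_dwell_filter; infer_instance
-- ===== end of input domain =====

-- B replaces A's in-place rewrite with its per-short-run backward scan for the previous
-- non-warmup label by a run-compression pass plus one forward pass carrying that label
-- (objective: alternative algorithm; not measured faster on the timing inputs).

-- ===== PORT A =====
-- inner 'while j < n and out[j] == out[i]' loop
def pvA_findJ (out : List String) (lab : String) (j n : Nat) : Nat :=
  if h : j < n ∧ out.getD j "" = lab then pvA_findJ out lab (j + 1) n else j
termination_by n - j
decreasing_by omega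

-- cited by pvA_loop's decreasing_by
theorem pvA_findJ_ge (out : List String) (lab : String) (j n : Nat) : j ≤ pvA_findJ out lab j n := by
  unfold pvA_findJ
  split
  · have := pvA_findJ_ge out lab (j + 1) n; omega
  · omega
termination_by n - j

-- 'for k in range(i-1, -1, -1): if out[k] != "warmup": prev = out[k]; break' (k counts down)
def pvA_prevScan (out : List String) (k : Nat) (fallback : String) : String :=
  if out.getD k "" ≠ "warmup" then out.getD k ""
  else match k with
    | 0 => fallback
    | k' + 1 => pvA_prevScan out k' fallback

-- 'prev = out[i]' then the backward scan (empty range when i = 0)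
def pvA_prevOf (out : List String) (i : Nat) : String :=
  match i with
  | 0 => out.getD 0 ""
  | i' + 1 => pvA_prevScan out i' (out.getD (i' + 1) "")

-- 'for k in range(i, j): out[k] = prev'
def pvA_setRange (out : List String) (i j : Nat) (v : String) : List String :=
  (PySem.List.pyRange (i : Int) (j : Int) 1).foldl (fun o k => PySem.List.pySetD o k v) out

-- cited by pvA_loop's decreasing_by
theorem pvA_setRange_length (out : List String) (i j : Nat) (v : String) :
    (pvA_setRange out i j v).length = out.length := by
  unfold pvA_setRange
  generalize PySem.List.pyRange (i : Int) (j : Int) 1 = l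
  induction l generalizing out with
  | nil => rfl
  | cons k l ih => simp [List.foldl, ih]

-- outer 'while i < n' loop of A, acting on the mutable list 'out'
def pvA_loop (out : List String) (i : Nat) (min_dwell : Int) : List String :=
  if h : i < out.length then
    if out.getD i "" = "warmup" then pvA_loop out (i + 1) min_dwell
    else
      let j := pvA_findJ out (out.getD i "") (i + 1) out.length
      if ((j : Int) - (i : Int)) < min_dwell then
        pvA_loop (pvA_setRange out i j (pvA_prevOf out i)) j min_dwell
      else
        pvA_loop out j min_dwell
  else out
termination_by out.length - i
decreasing_by
  · omega
  · have hj := pvA_findJ_ge out (out.getD i "") (i + 1) out.length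
    rw [pvA_setRange_length]; omega
  · have hj := pvA_findJ_ge out (out.getD i "") (i + 1) out.length
    omega

def apply_dwell_filter (regime_labels : List String) (min_dwell : Int) : List String :=
  pvA_loop regime_labels 0 min_dwell

-- ===== PORT B =====
-- one step of B's run-compression loop ('runs[-1]' is the head of the reversed accumulator)
def pvB_step (acc : List (String × Nat)) (lab : String) : List (String × Nat) :=
  match acc with
  | (r, c) :: t => if r = lab ∧ lab ≠ "warmup" then (r, c + 1) :: t else (lab, 1) :: (r, c) :: t
  | [] => [(lab, 1)]

def pvB_runs (regime_labels : List String) : List (String × Nat) :=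
  (regime_labels.foldl pvB_step []).reverse

-- one step of B's emit loop; state = (out, last)
def pvB_estep (min_dwell : Int) (st : List String × Option String) (r : String × Nat) :
    List String × Option String :=
  if r.1 = "warmup" then (st.1 ++ List.replicate r.2 "warmup", st.2)
  else
    let emit := if (r.2 : Int) ≥ min_dwell ∨ st.2 = none then r.1 else st.2.getD r.1
    (st.1 ++ List.replicate r.2 emit, some emit)

def apply_dwell_filter_alt (regime_labels : List String) (min_dwell : Int) : List String :=
  ((pvB_runs regime_labels).foldl (pvB_estep min_dwell) ([], none)).1

-- ===== PRECONDITION & SPEC =====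
def Spec_apply_dwell_filter (regime_labels : List String) (min_dwell : Int) (out : List String) : Prop := out = apply_dwell_filter_alt regime_labels min_dwell
instance (regime_labels : List String) (min_dwell : Int) (out : List String) : Decidable (Spec_apply_dwell_filter regime_labels min_dwell out) := by unfold Spec_apply_dwell_filter; infer_instance

-- ===== CLAIM (what is proved, stated in full; the proofs are below) =====
def Claim_equal_apply_dwell_filter : Prop := ∀ (regime_labels : List String) (min_dwell : Int), Dom_apply_dwell_filter regime_labels min_dwell → Spec_apply_dwell_filter regime_labels min_dwell (apply_dwell_filter regime_labels min_dwell)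

-- ===== LEMMAS AND PROOFS =====

-- length of the leading run of 'lab'
def leadCount (lab : String) : List String → Nat
  | [] => 0
  | x :: xs => if x = lab then leadCount lab xs + 1 else 0

-- the common functional specification: process runs left to right carrying the
-- last finalized non-warmup label
def specF (md : Int) : List String → Option String → List String
  | [], _ => []
  | lab :: rest, last =>
    if lab = "warmup" then "warmup" :: specF md rest last
    else
      let emit := if ((leadCount lab rest + 1 : Nat) : Int) ≥ md ∨ last = none then lab
                  else last.getD lab
      List.replicate (leadCount lab rest + 1) emit ++
        specF md (rest.drop (leadCount lab rest)) (some emit)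
termination_by xs => xs.length
decreasing_by all_goals (simp; try omega)

-- last non-warmup element of a list
def lastNW (xs : List String) : Option String :=
  xs.foldl (fun acc x => if x = "warmup" then acc else some x) none

-- run decomposition of a list (the value pvB_runs computes)
def runsSpec : List String → List (String × Nat)
  | [] => []
  | lab :: rest =>
    if lab = "warmup" then ("warmup", 1) :: runsSpec rest
    else (lab, leadCount lab rest + 1) :: runsSpec (rest.drop (leadCount lab rest))
termination_by xs => xs.length
decreasing_by all_goals (simp; try omega)

theorem leadCount_le (lab : String) (xs : List String) : leadCount lab xs ≤ xs.length := by
  induction xs with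
  | nil => simp [leadCount]
  | cons x xs ih => simp only [leadCount, List.length_cons]; split <;> omega

theorem take_leadCount (lab : String) (xs : List String) :
    xs.take (leadCount lab xs) = List.replicate (leadCount lab xs) lab := by
  induction xs with
  | nil => simp [leadCount]
  | cons x xs ih =>
    simp only [leadCount]
    split
    · next h => simp [List.replicate_succ, h, ih]
    · simp

theorem head_drop_leadCount (lab : String) (xs : List String) :
    (xs.drop (leadCount lab xs)).head? ≠ some lab := by
  induction xs with
  | nil => simp [leadCount]
  | cons x xs ih =>
    simp only [leadCount]
    split
    · next h => simpa using ih
    · next h => simpa using h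

theorem lastNW_append_singleton (a : List String) (x : String) :
    lastNW (a ++ [x]) = if x = "warmup" then lastNW a else some x := by
  simp [lastNW, List.foldl_append]

theorem foldl_lastNW_ne_warmup (xs : List String) : ∀ (init : Option String),
    init ≠ some "warmup" →
    xs.foldl (fun acc x => if x = "warmup" then acc else some x) init ≠ some "warmup" := by
  induction xs with
  | nil => intro init h; simpa using h
  | cons x xs ih =>
    intro init h
    simp only [List.foldl_cons]
    apply ih
    split
    · exact h
    · next hx => simpa using hx

theorem lastNW_ne_warmup (xs : List String) : lastNW xs ≠ some "warmup" := by
  exact foldl_lastNW_ne_warmup xs none (by simp)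

theorem lastNW_append_replicate (a : List String) (c : Nat) (lab : String) (h : lab ≠ "warmup") :
    lastNW (a ++ List.replicate (c + 1) lab) = some lab := by
  induction c generalizing a with
  | zero => simp [lastNW_append_singleton, h]
  | succ c ih =>
    have : a ++ List.replicate (c + 1 + 1) lab = (a ++ [lab]) ++ List.replicate (c + 1) lab := by
      simp [List.replicate_succ]
    rw [this, ih]

theorem pvA_prevScan_eq (out : List String) (k : Nat) (fb : String) (hk : k < out.length) :
    pvA_prevScan out k fb = (lastNW (out.take (k + 1))).getD fb := by
  induction k with
  | zero =>
    unfold pvA_prevScan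
    have h0 : out.take 1 = [out.getD 0 ""] := by
      cases out with
      | nil => simp at hk
      | cons x xs => simp [List.getD]
    rw [h0]
    split
    · next h =>
      simp only [List.getD] at h
      simp [lastNW, h]
    · next h =>
      simp only [ne_eq, not_not, List.getD] at h
      simp [lastNW, h]
  | succ k ih =>
    unfold pvA_prevScan
    have hgd : out.getD (k + 1) "" = out[k + 1] := List.getD_eq_getElem out "" hk
    have ht : out.take (k + 1 + 1) = out.take (k + 1) ++ [out[k + 1]] := by
      rw [List.take_add_one]
      simp [List.getElem?_eq_getElem hk]
    rw [ht, lastNW_append_singleton]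
    split
    · next h =>
      rw [if_neg (by rw [hgd] at h; exact h), hgd]
      rfl
    · next h =>
      simp only [ne_eq, not_not] at h
      rw [hgd] at h
      rw [if_pos h]
      exact ih (by omega)

theorem pvA_prevOf_eq (out : List String) (i : Nat) (hi : i < out.length) :
    pvA_prevOf out i = (lastNW (out.take i)).getD (out.getD i "") := by
  match i with
  | 0 => simp [pvA_prevOf, lastNW]
  | i' + 1 => exact pvA_prevScan_eq out i' (out.getD (i' + 1) "") (by omega)

theorem pvA_findJ_eq (out : List String) (lab : String) (j : Nat) (hj : j ≤ out.length) :
    pvA_findJ out lab j out.length = j + leadCount lab (out.drop j) := by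
  unfold pvA_findJ
  split
  · next h =>
    obtain ⟨hlt, heq⟩ := h
    have hd : out.drop j = out[j] :: out.drop (j + 1) := List.drop_eq_getElem_cons hlt
    have hgd : out.getD j "" = out[j] := List.getD_eq_getElem out "" hlt
    rw [pvA_findJ_eq out lab (j + 1) (by omega), hd]
    simp only [leadCount]
    rw [if_pos (by rw [← hgd]; exact heq)]
    omega
  · next h =>
    rcases Nat.lt_or_ge j out.length with hlt | hge
    · have hd : out.drop j = out[j] :: out.drop (j + 1) := List.drop_eq_getElem_cons hlt
      have hgd : out.getD j "" = out[j] := List.getD_eq_getElem out "" hlt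
      have hne : ¬ out[j] = lab := by
        intro hc; exact h ⟨hlt, by rw [hgd, hc]⟩
      rw [hd]
      simp [leadCount, hne]
    · have : j = out.length := by omega
      subst this
      simp [List.drop_length, leadCount]
termination_by out.length - j

theorem pvA_setRange_eq (v : String) (i j : Nat) (out : List String)
    (hij : i ≤ j) (hj : j ≤ out.length) :
    pvA_setRange out i j v = out.take i ++ List.replicate (j - i) v ++ out.drop j := by
  unfold pvA_setRange
  by_cases h : i < j
  · rw [PySem.List.pyRange_one_cons (by exact_mod_cast h)]
    simp only [List.foldl_cons, PySem.List.pySetD_natCast]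
    have hcast : ((i : Int) + 1) = ((i + 1 : Nat) : Int) := by push_cast; ring
    rw [hcast]
    have ih := pvA_setRange_eq v (i + 1) j (out.set i v) h (by simpa using hj)
    unfold pvA_setRange at ih
    rw [ih]
    have hset : out.set i v = out.take i ++ v :: out.drop (i + 1) := by
      rw [List.set_eq_take_append_cons_drop, if_pos (by omega)]
    have hlen : (out.take i).length = i := List.length_take_of_le (by omega)
    rw [hset]
    have htake : (out.take i ++ v :: out.drop (i + 1)).take (i + 1)
        = out.take i ++ [v] := by
      rw [List.take_append, List.take_of_length_le (by omega), hlen]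
      simp
    have hdrop : (out.take i ++ v :: out.drop (i + 1)).drop j = out.drop j := by
      rw [List.drop_append, hlen]
      have h1 : j - i = (j - i - 1) + 1 := by omega
      rw [List.drop_of_length_le (by omega), h1]
      simp only [List.drop_succ_cons, List.drop_drop, List.nil_append]
      congr 1
      omega
    rw [htake, hdrop]
    have hrep : [v] ++ List.replicate (j - (i + 1)) v = List.replicate (j - i) v := by
      have h2 : j - i = (j - (i + 1)) + 1 := by omega
      rw [h2, List.replicate_succ]
      rfl
    rw [← hrep]
    simp [List.append_assoc]
  · have hij' : i = j := by omega
    subst hij'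
    rw [PySem.List.pyRange_one_eq_nil (by omega)]
    simp [List.take_append_drop]
termination_by j - i

theorem pvA_loop_eq (md : Int) (k : Nat) : ∀ (out : List String) (i : Nat),
    out.length - i ≤ k → i ≤ out.length →
    pvA_loop out i md = out.take i ++ specF md (out.drop i) (lastNW (out.take i)) := by
  induction k with
  | zero =>
    intro out i hk hi
    have hieq : i = out.length := by omega
    subst hieq
    rw [pvA_loop, dif_neg (by omega)]
    simp [specF, List.take_of_length_le]
  | succ k ih =>
    intro out i hk hi
    by_cases hlt : i < out.length
    case neg =>
      have hieq : i = out.length := by omega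
      subst hieq
      rw [pvA_loop, dif_neg (by omega)]
      simp [specF, List.take_of_length_le]
    case pos =>
    have hgd : out.getD i "" = out[i] := List.getD_eq_getElem out "" hlt
    have hdropi : out.drop i = out[i] :: out.drop (i + 1) := List.drop_eq_getElem_cons hlt
    have htake1 : out.take (i + 1) = out.take i ++ [out[i]] := by
      rw [List.take_add_one]; simp [List.getElem?_eq_getElem hlt]
    by_cases hw : out.getD i "" = "warmup"
    · -- warmup: skip one position
      rw [pvA_loop, dif_pos hlt, if_pos hw]
      rw [ih out (i + 1) (by omega) (by omega)]
      rw [hgd] at hw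
      rw [htake1, lastNW_append_singleton, if_pos hw, hdropi, hw, specF, if_pos rfl]
      simp [List.append_assoc]
    · -- non-warmup run starting at i
      rw [pvA_loop, dif_pos hlt, if_neg hw]
      rw [hgd] at hw ⊢
      have hlle : leadCount out[i] (out.drop (i + 1)) ≤ out.length - (i + 1) := by
        have := leadCount_le out[i] (out.drop (i + 1))
        simpa using this
      have hJ : pvA_findJ out out[i] (i + 1) out.length
          = (i + 1) + leadCount out[i] (out.drop (i + 1)) :=
        pvA_findJ_eq out out[i] (i + 1) (by omega)
      rw [hJ]
      set l := leadCount out[i] (out.drop (i + 1)) with hl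
      set j := (i + 1) + l with hjdef
      clear_value l j
      have hdropi' : out.drop i = out[i] :: out.drop (i + 1) := hdropi
      have htake_run : out.take j = out.take i ++ List.replicate (l + 1) out[i] := by
        have hsum : j = i + (l + 1) := by omega
        rw [hsum, List.take_add]
        congr 1
        rw [hdropi', List.take_succ_cons, hl, take_leadCount, ← List.replicate_succ]
      have hdrop_run : (out.drop (i + 1)).drop l = out.drop j := by
        rw [List.drop_drop]
        congr 1
        omega
      rw [hdropi', specF, if_neg hw]
      simp only [← hl]
      set last := lastNW (out.take i) with hlast
      clear_value last
      by_cases hmd : ((j : Nat) : Int) - (i : Int) < md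
      · -- short run: rewrite it with prev
        rw [if_pos hmd]
        have hnotge : ¬ (((l + 1 : Nat) : Int) ≥ md) := by
          push_cast at hmd ⊢
          omega
        have hprev : pvA_prevOf out i = last.getD out[i] := by
          rw [pvA_prevOf_eq out i hlt, hgd, hlast]
        have hemit : (if ((l + 1 : Nat) : Int) ≥ md ∨ last = none then out[i]
            else last.getD out[i]) = last.getD out[i] := by
          by_cases hn : last = none
          · rw [if_pos (Or.inr hn), hn]; rfl
          · rw [if_neg (by rintro (h | h); exact hnotge h; exact hn h)]
        have hprevne : last.getD out[i] ≠ "warmup" := by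
          have hne := lastNW_ne_warmup (out.take i)
          rw [← hlast] at hne
          cases last with
          | none => simpa using hw
          | some v =>
            intro hc
            simp only [Option.getD] at hc
            exact hne (by rw [hc])
        have hsr : pvA_setRange out i j (pvA_prevOf out i)
            = out.take i ++ List.replicate (l + 1) (last.getD out[i]) ++ out.drop j := by
          have hji : j - i = l + 1 := by omega
          rw [pvA_setRange_eq (pvA_prevOf out i) i j out (by omega) (by omega), hprev, hji]
        have hlen' : (out.take i ++ List.replicate (l + 1) (last.getD out[i]) ++ out.drop j).length
            = out.length := by
          simp [List.length_take, List.length_drop]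
          omega
        rw [hsr, ih _ j (by rw [hlen', hjdef]; omega) (by rw [hlen', hjdef]; omega)]
        have hP : (out.take i ++ List.replicate (l + 1) (last.getD out[i])).length = j := by
          simp [List.length_take]
          omega
        rw [List.append_assoc, ← List.append_assoc (out.take i)]
        rw [List.take_left' hP, List.drop_left' hP]
        rw [lastNW_append_replicate _ l _ hprevne]
        rw [hemit, ← hdrop_run]
        simp [List.append_assoc]
      · -- long run: keep it
        rw [if_neg hmd]
        rw [ih out j (by rw [hjdef]; omega) (by rw [hjdef]; omega)]
        have hge : ((l + 1 : Nat) : Int) ≥ md := by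
          push_cast at hmd ⊢
          omega
        rw [htake_run, lastNW_append_replicate _ l _ hw, if_pos (Or.inl hge), ← hdrop_run]
        simp [List.append_assoc]

theorem pvB_fold_merge (lab : String) (hlab : lab ≠ "warmup") (xs : List String) :
    ∀ (c : Nat) (t : List (String × Nat)),
    xs.foldl pvB_step ((lab, c) :: t) =
      (xs.drop (leadCount lab xs)).foldl pvB_step ((lab, c + leadCount lab xs) :: t) := by
  induction xs with
  | nil => intro c t; simp [leadCount]
  | cons x xs ih =>
    intro c t
    by_cases hx : x = lab
    · subst hx
      have hstep : pvB_step ((x, c) :: t) x = (x, c + 1) :: t := by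
        simp [pvB_step, hlab]
      have hlc : leadCount x (x :: xs) = leadCount x xs + 1 := by simp [leadCount]
      have hacc : c + 1 + leadCount x xs = c + (leadCount x xs + 1) := by omega
      rw [List.foldl_cons, hstep, ih (c + 1) t, hacc, hlc, List.drop_succ_cons]
    · have hx' : ¬ lab = x := fun h => hx h.symm
      have hstep : pvB_step ((lab, c) :: t) x = (x, 1) :: (lab, c) :: t := by
        simp [pvB_step, hx']
      simp only [leadCount, if_neg hx, Nat.add_zero, List.drop_zero, List.foldl_cons]

theorem pvB_runs_eq_aux (n : Nat) : ∀ (xs : List String) (acc : List (String × Nat)),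
    xs.length ≤ n →
    (∀ r c, acc.head? = some (r, c) → r = "warmup" ∨ xs.head? ≠ some r) →
    (xs.foldl pvB_step acc).reverse = acc.reverse ++ runsSpec xs := by
  induction n with
  | zero =>
    intro xs acc hlen hok
    have hnil : xs = [] := List.eq_nil_of_length_eq_zero (by omega)
    subst hnil
    simp [runsSpec]
  | succ n ih =>
    intro xs acc hlen hok
    match xs with
    | [] => simp [runsSpec]
    | x :: rest =>
      have hstep : pvB_step acc x = (x, 1) :: acc := by
        match acc with
        | [] => rfl
        | (r, c) :: t =>
          have hrc := hok r c rfl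
          simp only [pvB_step]
          rw [if_neg]
          rintro ⟨h1, h2⟩
          rcases hrc with h | h
          · exact h2 (h1 ▸ h)
          · exact h (by simp [h1])
      simp only [List.foldl_cons, hstep]
      by_cases hw : x = "warmup"
      · subst hw
        rw [ih rest (("warmup", 1) :: acc) (by simpa using hlen)
          (by intro r c h; simp at h; left; exact h.1.symm)]
        simp [runsSpec]
      · rw [pvB_fold_merge x hw rest 1 acc]
        rw [ih (rest.drop (leadCount x rest)) ((x, 1 + leadCount x rest) :: acc)
          (by have h1 := leadCount_le x rest
              simp only [List.length_drop]
              simp only [List.length_cons] at hlen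
              omega)
          (by intro r c h
              simp only [List.head?_cons, Option.some.injEq, Prod.mk.injEq] at h
              right
              rw [← h.1]
              exact head_drop_leadCount x rest)]
        simp only [List.reverse_cons, runsSpec, if_neg hw]
        rw [Nat.add_comm 1 (leadCount x rest)]
        simp [List.append_assoc]

theorem pvB_runs_eq (xs : List String) : pvB_runs xs = runsSpec xs := by
  simpa [pvB_runs] using pvB_runs_eq_aux xs.length xs [] le_rfl (by simp)

theorem pvB_emit_prefix (md : Int) (runs : List (String × Nat)) :
    ∀ (out : List String) (last : Option String),
    (runs.foldl (pvB_estep md) (out, last)).1 = out ++ (runs.foldl (pvB_estep md) ([], last)).1 := by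
  induction runs with
  | nil => intro out last; simp
  | cons r rs ih =>
    intro out last
    obtain ⟨lab, c⟩ := r
    by_cases hw : lab = "warmup"
    · have h1 : pvB_estep md (out, last) (lab, c) = (out ++ List.replicate c "warmup", last) := by
        simp [pvB_estep, hw]
      have h2 : pvB_estep md ([], last) (lab, c) = (List.replicate c "warmup", last) := by
        simp [pvB_estep, hw]
      rw [List.foldl_cons, List.foldl_cons, h1, h2, ih, ih (List.replicate c "warmup") last]
      simp [List.append_assoc]
    · have h1 : pvB_estep md (out, last) (lab, c) =
          (out ++ List.replicate c (if (c : Int) ≥ md ∨ last = none then lab else last.getD lab),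
           some (if (c : Int) ≥ md ∨ last = none then lab else last.getD lab)) := by
        simp [pvB_estep, hw]
      have h2 : pvB_estep md ([], last) (lab, c) =
          (List.replicate c (if (c : Int) ≥ md ∨ last = none then lab else last.getD lab),
           some (if (c : Int) ≥ md ∨ last = none then lab else last.getD lab)) := by
        simp [pvB_estep, hw]
      rw [List.foldl_cons, List.foldl_cons, h1, h2, ih, ih (List.replicate c _) (some _)]
      simp [List.append_assoc]

theorem pvB_emit_eq (md : Int) (n : Nat) : ∀ (xs : List String) (last : Option String),
    xs.length ≤ n →
    ((runsSpec xs).foldl (pvB_estep md) ([], last)).1 = specF md xs last := by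
  induction n with
  | zero =>
    intro xs last hlen
    have hnil : xs = [] := List.eq_nil_of_length_eq_zero (by omega)
    subst hnil
    simp [runsSpec, specF]
  | succ n ih =>
    intro xs last hlen
    match xs with
    | [] => simp [runsSpec, specF]
    | lab :: rest =>
      by_cases hw : lab = "warmup"
      · subst hw
        rw [runsSpec, if_pos rfl]
        simp only [List.foldl_cons]
        rw [show pvB_estep md ([], last) ("warmup", 1) = (["warmup"], last) from by
          simp [pvB_estep, List.replicate]]
        rw [pvB_emit_prefix, ih rest last (by simpa using hlen)]
        rw [specF, if_pos rfl]
        rfl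
      · rw [runsSpec, if_neg hw]
        simp only [List.foldl_cons]
        rw [show pvB_estep md ([], last) (lab, leadCount lab rest + 1) =
            (List.replicate (leadCount lab rest + 1)
              (if ((leadCount lab rest + 1 : Nat) : Int) ≥ md ∨ last = none then lab
               else last.getD lab),
             some (if ((leadCount lab rest + 1 : Nat) : Int) ≥ md ∨ last = none then lab
               else last.getD lab)) from by
          simp [pvB_estep, hw]]
        rw [pvB_emit_prefix,
          ih (rest.drop (leadCount lab rest)) _ (by
            have h1 := leadCount_le lab rest
            simp only [List.length_drop]
            simp only [List.length_cons] at hlen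
            omega)]
        rw [specF, if_neg hw]

-- ===== VERDICT (by name: the statement is the Claim_ definition above) =====
theorem apply_dwell_filter_spec : Claim_equal_apply_dwell_filter := by
  intro labels md _
  unfold Spec_apply_dwell_filter apply_dwell_filter apply_dwell_filter_alt
  rw [pvB_runs_eq, pvB_emit_eq md labels.length labels none le_rfl,
    pvA_loop_eq md labels.length labels 0 (by omega) (by omega)]
  simp [lastNW]
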